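-- pv_equiv track=rewrite | github.com/s-hong46/thalia_studio | app/services/video_match_service.py | _watch_hint
-- ===== SOURCE A (Python) =====
-- from typing import Dict, Iterable, List, Optional, Tuple
--
-- def _watch_hint(issue_types: Iterable[str]) -> str:
--     issue_set = {str(item).strip() for item in issue_types if str(item).strip()}
--     if "speed-up" in issue_set or "pause-too-short" in issue_set:
--         return "Watch where the comedian lets the line breathe before the point."
--     if "low-energy" in issue_set or "unclear-emphasis" in issue_set:
--         return "Watch which word suddenly becomes the point of the line."
--     if "tone-flat" in issue_set or "falling-intonation" in issue_set:
--         return "Listen to how the line changes shape at the end."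
--     return "Watch how the comedian keeps the thought clear without forcing it."
-- ===== SOURCE B (Python) =====
-- _HINTS = {
--     "speed-up": (0, "Watch where the comedian lets the line breathe before the point."),
--     "pause-too-short": (0, "Watch where the comedian lets the line breathe before the point."),
--     "low-energy": (1, "Watch which word suddenly becomes the point of the line."),
--     "unclear-emphasis": (1, "Watch which word suddenly becomes the point of the line."),
--     "tone-flat": (2, "Listen to how the line changes shape at the end."),
--     "falling-intonation": (2, "Listen to how the line changes shape at the end."),
-- }
--
-- _DEFAULT = "Watch how the comedian keeps the thought clear without forcing it."
--
--
-- def _watch_hint(issue_types):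
--     best = None
--     for item in issue_types:
--         entry = _HINTS.get(str(item).strip())
--         if entry is not None and (best is None or entry[0] < best[0]):
--             best = entry
--     return best[1] if best is not None else _DEFAULT
-- ===== Notes on version B (the rewrite author's own statement) =====
-- stated objective: idiomatic
-- what changed: Replaces building a set and probing it with three ordered membership guards by a data-driven table mapping each recognised tag to (priority, hint) and a single min-priority pass over the stripped tags.
import Mathlib
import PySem

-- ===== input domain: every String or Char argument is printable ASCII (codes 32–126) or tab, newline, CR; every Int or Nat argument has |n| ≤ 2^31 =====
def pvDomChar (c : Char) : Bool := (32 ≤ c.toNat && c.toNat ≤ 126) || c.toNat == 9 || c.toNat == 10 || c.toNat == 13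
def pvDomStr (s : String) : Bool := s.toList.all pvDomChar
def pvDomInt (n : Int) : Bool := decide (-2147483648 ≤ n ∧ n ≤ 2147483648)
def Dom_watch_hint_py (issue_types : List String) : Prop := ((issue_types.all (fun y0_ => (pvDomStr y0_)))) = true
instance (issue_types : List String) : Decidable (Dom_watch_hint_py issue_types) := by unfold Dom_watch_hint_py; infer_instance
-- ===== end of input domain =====

-- B replaces the set + three ordered membership guards by a tag → (priority, hint) table
-- and a single min-priority pass over the stripped tags (idiomatic, data-driven).

-- ===== PORT A =====
def watch_hint_py (issue_types : List String) : String :=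
  let issue_set : PySem.Set String :=
    PySem.Set.ofList ((issue_types.map (fun item => PySem.Str.strip item)).filter (fun t => t ≠ ""))
  if PySem.Set.contains issue_set "speed-up" || PySem.Set.contains issue_set "pause-too-short" then
    "Watch where the comedian lets the line breathe before the point."
  else if PySem.Set.contains issue_set "low-energy" || PySem.Set.contains issue_set "unclear-emphasis" then
    "Watch which word suddenly becomes the point of the line."
  else if PySem.Set.contains issue_set "tone-flat" || PySem.Set.contains issue_set "falling-intonation" then
    "Listen to how the line changes shape at the end."
  else
    "Watch how the comedian keeps the thought clear without forcing it."

-- ===== PORT B =====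
def pvHints : PySem.Dict String (Int × String) :=
  PySem.Dict.ofList
    [ ("speed-up", (0, "Watch where the comedian lets the line breathe before the point."))
    , ("pause-too-short", (0, "Watch where the comedian lets the line breathe before the point."))
    , ("low-energy", (1, "Watch which word suddenly becomes the point of the line."))
    , ("unclear-emphasis", (1, "Watch which word suddenly becomes the point of the line."))
    , ("tone-flat", (2, "Listen to how the line changes shape at the end."))
    , ("falling-intonation", (2, "Listen to how the line changes shape at the end.")) ]

def pvDefault : String := "Watch how the comedian keeps the thought clear without forcing it."

def pvStep (best : Option (Int × String)) (item : String) : Option (Int × String) :=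
  match PySem.Dict.get? pvHints (PySem.Str.strip item) with
  | some entry =>
      match best with
      | none => some entry
      | some b => if entry.1 < b.1 then some entry else some b
  | none => best

def watch_hint_py_alt (issue_types : List String) : String :=
  match issue_types.foldl pvStep none with
  | some b => b.2
  | none => pvDefault

-- ===== PRECONDITION & SPEC =====
def Spec_watch_hint_py (issue_types : List String) (out : String) : Prop := out = watch_hint_py_alt issue_types
instance (issue_types : List String) (out : String) : Decidable (Spec_watch_hint_py issue_types out) := by unfold Spec_watch_hint_py; infer_instance

-- ===== CLAIM (what is proved, stated in full; the proofs are below) =====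
def Claim_equal_watch_hint_py : Prop := ∀ (issue_types : List String), Dom_watch_hint_py issue_types → Spec_watch_hint_py issue_types (watch_hint_py issue_types)

-- ===== LEMMAS AND PROOFS =====

def pvH0 : String := "Watch where the comedian lets the line breathe before the point."
def pvH1 : String := "Watch which word suddenly becomes the point of the line."
def pvH2 : String := "Listen to how the line changes shape at the end."

def pvT0 (s : String) : Bool := PySem.Str.strip s == "speed-up" || PySem.Str.strip s == "pause-too-short"
def pvT1 (s : String) : Bool := PySem.Str.strip s == "low-energy" || PySem.Str.strip s == "unclear-emphasis"
def pvT2 (s : String) : Bool := PySem.Str.strip s == "tone-flat" || PySem.Str.strip s == "falling-intonation"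

lemma pv_get (t : String) : PySem.Dict.get? pvHints t =
    (if t = "speed-up" then some ((0 : Int), pvH0)
     else if t = "pause-too-short" then some ((0 : Int), pvH0)
     else if t = "low-energy" then some ((1 : Int), pvH1)
     else if t = "unclear-emphasis" then some ((1 : Int), pvH1)
     else if t = "tone-flat" then some ((2 : Int), pvH2)
     else if t = "falling-intonation" then some ((2 : Int), pvH2)
     else none) := by
  split_ifs with h0 h1 h2 h3 h4 h5
  · subst h0; decide
  · subst h1; decide
  · subst h2; decide
  · subst h3; decide
  · subst h4; decide
  · subst h5; decide
  · have hk : (pvHints).keys = ["speed-up", "pause-too-short", "low-energy",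
        "unclear-emphasis", "tone-flat", "falling-intonation"] := by decide
    rw [PySem.Dict.get?_eq_none_iff_contains, ← Bool.not_eq_true,
        PySem.Dict.contains_iff_mem_keys, hk]
    simp [h0, h1, h2, h3, h4, h5]

lemma pv_any_contra {α : Type} {l : List α} {f : α → Bool}
    (h1 : ∀ x ∈ l, f x = false) (h2 : ∃ x ∈ l, f x = true) : False := by
  obtain ⟨x, hx, hfx⟩ := h2
  simp [h1 x hx] at hfx

set_option maxHeartbeats 1600000 in
lemma pv_fold_quad (l : List String) :
    l.foldl pvStep (some (0, pvH0)) = some (0, pvH0)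
  ∧ l.foldl pvStep (some (1, pvH1)) = (if l.any pvT0 then some (0, pvH0) else some (1, pvH1))
  ∧ l.foldl pvStep (some (2, pvH2)) =
      (if l.any pvT0 then some (0, pvH0) else if l.any pvT1 then some (1, pvH1) else some (2, pvH2))
  ∧ l.foldl pvStep none =
      (if l.any pvT0 then some (0, pvH0) else if l.any pvT1 then some (1, pvH1)
       else if l.any pvT2 then some (2, pvH2) else none) := by
  induction l with
  | nil => simp
  | cons hd tl ih =>
    obtain ⟨ih0, ih1, ih2, ihn⟩ := ih
    have hstep : ∀ acc, pvStep acc hd =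
        (if PySem.Str.strip hd = "speed-up" ∨ PySem.Str.strip hd = "pause-too-short" then
           (match acc with
            | none => some ((0 : Int), pvH0)
            | some b => if 0 < b.1 then some ((0 : Int), pvH0) else some b)
         else if PySem.Str.strip hd = "low-energy" ∨ PySem.Str.strip hd = "unclear-emphasis" then
           (match acc with
            | none => some ((1 : Int), pvH1)
            | some b => if 1 < b.1 then some ((1 : Int), pvH1) else some b)
         else if PySem.Str.strip hd = "tone-flat" ∨ PySem.Str.strip hd = "falling-intonation" then
           (match acc with
            | none => some ((2 : Int), pvH2)
            | some b => if 2 < b.1 then some ((2 : Int), pvH2) else some b)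
         else acc) := by
      intro acc
      unfold pvStep
      rw [pv_get]
      split_ifs with h0 h1 h2 h3 h4 h5 <;> simp_all
    have hT0 : (hd :: tl).any pvT0 = (decide (PySem.Str.strip hd = "speed-up" ∨ PySem.Str.strip hd = "pause-too-short") || tl.any pvT0) := by
      by_cases hA : PySem.Str.strip hd = "speed-up" <;> by_cases hB : PySem.Str.strip hd = "pause-too-short" <;>
        simp [pvT0, List.any_cons, hA, hB]
    have hT1 : (hd :: tl).any pvT1 = (decide (PySem.Str.strip hd = "low-energy" ∨ PySem.Str.strip hd = "unclear-emphasis") || tl.any pvT1) := by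
      by_cases hA : PySem.Str.strip hd = "low-energy" <;> by_cases hB : PySem.Str.strip hd = "unclear-emphasis" <;>
        simp [pvT1, List.any_cons, hA, hB]
    have hT2 : (hd :: tl).any pvT2 = (decide (PySem.Str.strip hd = "tone-flat" ∨ PySem.Str.strip hd = "falling-intonation") || tl.any pvT2) := by
      by_cases hA : PySem.Str.strip hd = "tone-flat" <;> by_cases hB : PySem.Str.strip hd = "falling-intonation" <;>
        simp [pvT2, List.any_cons, hA, hB]
    refine ⟨?_, ?_, ?_, ?_⟩ <;>
      rw [List.foldl_cons, hstep] <;>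
      [skip; rw [hT0]; rw [hT0, hT1]; rw [hT0, hT1, hT2]] <;>
      split_ifs with h0 h1 h2 <;> simp_all <;> split_ifs <;> (try simp_all) <;>
        exfalso <;>
        first
          | exact pv_any_contra (f := pvT0) (by assumption) (by assumption)
          | exact pv_any_contra (f := pvT1) (by assumption) (by assumption)
          | exact pv_any_contra (f := pvT2) (by assumption) (by assumption)

lemma pv_contains_eq (l : List String) (t : String) (ht : t ≠ "") :
    PySem.Set.contains
      (PySem.Set.ofList ((l.map (fun item => PySem.Str.strip item)).filter (fun t => t ≠ ""))) t
    = l.any (fun s => PySem.Str.strip s == t) := by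
  rw [Bool.eq_iff_iff]
  simp [PySem.Set.mem_ofList, List.mem_filter, List.mem_map, List.any_eq_true, ht]

lemma pv_any_or {α : Type} (l : List α) (p q : α → Bool) :
    l.any (fun s => p s || q s) = (l.any p || l.any q) := by
  induction l with
  | nil => simp
  | cons hd tl ih =>
    simp [List.any_cons, ih]
    cases p hd <;> cases q hd <;> simp

-- ===== VERDICT (by name: the statement is the Claim_ definition above) =====
theorem watch_hint_py_spec : Claim_equal_watch_hint_py := by
  intro l _
  unfold Spec_watch_hint_py watch_hint_py watch_hint_py_alt
  obtain ⟨-, -, -, hn⟩ := pv_fold_quad l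
  rw [hn]
  simp only [pv_contains_eq l "speed-up" (by decide), pv_contains_eq l "pause-too-short" (by decide),
      pv_contains_eq l "low-energy" (by decide), pv_contains_eq l "unclear-emphasis" (by decide),
      pv_contains_eq l "tone-flat" (by decide), pv_contains_eq l "falling-intonation" (by decide)]
  have e0 : l.any pvT0 = (l.any (fun s => PySem.Str.strip s == "speed-up") || l.any (fun s => PySem.Str.strip s == "pause-too-short")) := by
    rw [← pv_any_or]; rfl
  have e1 : l.any pvT1 = (l.any (fun s => PySem.Str.strip s == "low-energy") || l.any (fun s => PySem.Str.strip s == "unclear-emphasis")) := by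
    rw [← pv_any_or]; rfl
  have e2 : l.any pvT2 = (l.any (fun s => PySem.Str.strip s == "tone-flat") || l.any (fun s => PySem.Str.strip s == "falling-intonation")) := by
    rw [← pv_any_or]; rfl
  rw [← e0, ← e1, ← e2]
  by_cases c0 : l.any pvT0 <;> by_cases c1 : l.any pvT1 <;> by_cases c2 : l.any pvT2 <;>
    simp [c0, c1, c2, pvH0, pvH1, pvH2, pvDefault]
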